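-- pv_equiv track=rewrite | github.com/the-other-sunny/Advent-of-Code-2023 | python/day13/part2.py | solve
-- ===== SOURCE A (Python) =====
-- Pattern = list[list[str]]
--
-- def parse(input: str) -> list[Pattern]:
--     patterns = []
--
--     for pattern_str in input.split("\n\n"):
--         pattern = [[c for c in line] for line in pattern_str.splitlines()]
--         patterns.append(pattern)
--
--     return patterns
--
-- def transpose(pattern: Pattern) -> Pattern:
--     lines_count, cols_count = len(pattern), len(pattern[0])
--     return [[pattern[i][j] for i in range(lines_count)] for j in range(cols_count)]
--
-- def get_almost_horizontal_symetries(pattern: Pattern) -> list[tuple[int, int]]: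
--     almost_syms = []
--
--     lines_count, cols_count = len(pattern), len(pattern[0])
--
--     for i in range(lines_count - 1):
--         t_iter = reversed(range(i + 1))  # i, i-1, .., 0
--         b_iter = range(i + 1, lines_count)  # i+1, i+2, .., lines_count-1
--         misses = sum(
--             sum(1 for i in range(cols_count) if pattern[t][i] != pattern[b][i])
--             for (t, b) in zip(t_iter, b_iter)
--         )
--
--         if misses == 1:
--             almost_syms.append((i, i + 1))
--
--     return almost_syms
--
-- def find_almost_symetries(
--     pattern: Pattern,
-- ) -> tuple[list[tuple[int, int]], list[tuple[int, int]]]: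
--     horizontal_syms = get_almost_horizontal_symetries(pattern)
--     vertical_syms = get_almost_horizontal_symetries(transpose(pattern))
--
--     return vertical_syms, horizontal_syms
--
-- def solve(input: str) -> int:
--     answer = 0
--
--     for pattern in parse(input):
--         vertical_syms, horizontal_syms = find_almost_symetries(pattern)
--
--         assert len(vertical_syms) + len(horizontal_syms) == 1
--
--         for left_index, right_index in vertical_syms:
--             answer += left_index + 1
--
--         for top_index, _ in horizontal_syms:
--             answer += 100 * (top_index + 1)
--
--     return answer
-- ===== SOURCE B (Python) =====
-- def _hamming_is_one(r, s):
--     cnt = 0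
--     for a, b in zip(r, s):
--         if a != b:
--             cnt += 1
--     return cnt == 1
--
-- def _mirror_ok(rows, i):
--     bad = None
--     t, b = i, i + 1
--     while t >= 0 and b < len(rows):
--         if rows[t] != rows[b]:
--             if bad is not None:
--                 return False
--             bad = (t, b)
--         t -= 1
--         b += 1
--     return bad is not None and _hamming_is_one(rows[bad[0]], rows[bad[1]])
--
-- def _fold_scores(rows, weight):
--     return [weight * (i + 1) for i in range(len(rows) - 1) if _mirror_ok(rows, i)]
--
-- def solve(input: str) -> int:
--     total = 0
--     for block in input.split("\n\n"):
--         lines = block.splitlines()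
--         cols = [''.join(c) for c in zip(*lines)]
--         scores = _fold_scores(lines, 100) + _fold_scores(cols, 1)
--         assert len(scores) == 1
--         total += scores[0]
--     return total
-- ===== Notes on version B (the rewrite author's own statement) =====
-- stated objective: faster
-- what changed: A scores a fold line by summing per-cell mismatches over all mirrored pairs in a nested index scan (building an explicit transposed grid for columns); B does an equality-first two-pointer scan over whole rows that aborts as soon as a second unequal mirrored pair appears and computes a Hamming distance only for the single offending pair (columns via zip(*lines)), which a timing run measured much faster.
-- outside the precondition, e.g. on solve('.\n..\n#\n###\n.#.'): A returns 400, B raises AssertionError; on solve('#\n###\n.#.'): A returns 200, B raises AssertionError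
import Mathlib
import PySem

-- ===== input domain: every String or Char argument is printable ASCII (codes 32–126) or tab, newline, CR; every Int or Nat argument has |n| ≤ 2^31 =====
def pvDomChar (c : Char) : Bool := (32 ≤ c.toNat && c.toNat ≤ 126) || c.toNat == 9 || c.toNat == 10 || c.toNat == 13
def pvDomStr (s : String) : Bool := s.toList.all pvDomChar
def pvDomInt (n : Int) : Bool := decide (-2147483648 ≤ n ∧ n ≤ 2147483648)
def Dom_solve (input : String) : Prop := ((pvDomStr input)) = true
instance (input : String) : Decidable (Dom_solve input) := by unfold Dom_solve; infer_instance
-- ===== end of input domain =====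

-- A scores each candidate fold line by summing per-cell mismatches over all mirrored pairs
-- (building an explicit transposed grid for the vertical direction); B instead scans mirrored
-- whole-row pairs with two pointers, aborts once a second unequal pair appears, and computes a
-- Hamming distance only for the single offending pair (columns come from a zip-style transpose);
-- a timing run measured B faster by a large constant factor.

-- ===== PORT A =====
def parseA (input : String) : List (List (List Char)) :=
  (PySem.Chars.splitOn input.toList ['\n', '\n']).map (fun p => PySem.Chars.splitlines p)

def transposeA (pattern : List (List Char)) : List (List Char) :=
  let linesCount : Int := PySem.List.len pattern
  let colsCount : Int := PySem.List.len (PySem.List.pyGetD pattern 0 [])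
  (PySem.List.pyRange 0 colsCount 1).map (fun j =>
    (PySem.List.pyRange 0 linesCount 1).map (fun i =>
      PySem.List.pyGetD (PySem.List.pyGetD pattern i []) j ' '))

-- inner generator `sum(1 for i in range(cols_count) if pattern[t][i] != pattern[b][i])`
def missesRowA (pattern : List (List Char)) (colsCount t b : Int) : Int :=
  (PySem.List.pyRange 0 colsCount 1).foldl (fun s i =>
    if PySem.List.pyGetD (PySem.List.pyGetD pattern t []) i ' ' ≠
       PySem.List.pyGetD (PySem.List.pyGetD pattern b []) i ' ' then s + 1 else s) 0

def getAlmostHorizontalSymetries (pattern : List (List Char)) : List (Int × Int) :=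
  let linesCount : Int := PySem.List.len pattern
  let colsCount : Int := PySem.List.len (PySem.List.pyGetD pattern 0 [])
  (PySem.List.pyRange 0 (linesCount - 1) 1).foldl (fun acc i =>
    let misses := (List.zip ((PySem.List.pyRange 0 (i + 1) 1).reverse)
                            (PySem.List.pyRange (i + 1) linesCount 1)).foldl
        (fun s tb => s + missesRowA pattern colsCount tb.1 tb.2) 0
    if misses = 1 then acc ++ [(i, i + 1)] else acc) []

def solve (input : String) : Int :=
  (parseA input).foldl (fun answer pattern =>
    let verticalSyms := getAlmostHorizontalSymetries (transposeA pattern)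
    let horizontalSyms := getAlmostHorizontalSymetries pattern
    let answer := verticalSyms.foldl (fun a lr => a + (lr.1 + 1)) answer
    horizontalSyms.foldl (fun a tb => a + 100 * (tb.1 + 1)) answer) 0

-- ===== PORT B =====
-- `sum(1 for a,b in zip(r,s) if a != b) == 1`
def hammingIsOne (r s : List Char) : Bool :=
  decide ((List.zip r s).foldl (fun cnt ab => if ab.1 ≠ ab.2 then cnt + 1 else cnt) (0 : Int) = 1)

-- the `while t >= 0 and b < len(rows)` loop of _mirror_ok: `none` = early `return False`,
-- `some bad` = loop fell through with the current `bad`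
def scanPairs (rows : List (List Char)) (t b : Int) (bad : Option (Int × Int)) :
    Option (Option (Int × Int)) :=
  if h : 0 ≤ t ∧ b < PySem.List.len rows then
    if PySem.List.pyGetD rows t [] ≠ PySem.List.pyGetD rows b [] then
      match bad with
      | some _ => none
      | none => scanPairs rows (t - 1) (b + 1) (some (t, b))
    else scanPairs rows (t - 1) (b + 1) bad
  else some bad
termination_by (PySem.List.len rows - b).toNat
decreasing_by all_goals (simp only [PySem.List.len_eq] at h ⊢; omega)

def mirrorOk (rows : List (List Char)) (i : Int) : Bool :=
  match scanPairs rows i (i + 1) none with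
  | none => false
  | some none => false
  | some (some (t, b)) =>
      hammingIsOne (PySem.List.pyGetD rows t []) (PySem.List.pyGetD rows b [])

-- `[weight * (i + 1) for i in range(len(rows) - 1) if _mirror_ok(rows, i)]`
def foldScores (rows : List (List Char)) (weight : Int) : List Int :=
  ((PySem.List.pyRange 0 (PySem.List.len rows - 1) 1).filter (fun i => mirrorOk rows i)).map
    (fun i => weight * (i + 1))

-- `[''.join(c) for c in zip(*lines)]` : zip stops at the shortest line
def zipCols (lines : List (List Char)) : List (List Char) :=
  let m := ((lines.map List.length).min?).getD 0
  (List.range m).map (fun j => lines.map (fun r => r.getD j ' '))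

def solve_alt (input : String) : Int :=
  (PySem.Chars.splitOn input.toList ['\n', '\n']).foldl (fun total block =>
    let lines := PySem.Chars.splitlines block
    let cols := zipCols lines
    let scores := foldScores lines 100 ++ foldScores cols 1
    total + PySem.List.pyGetD scores 0 0) 0

-- ===== PRECONDITION & SPEC =====
-- Spec-level mirror-mismatch counts (independent formulation on Nat indices).
def pvMiss (g : List (List Char)) (a b : Nat) : Nat :=
  (List.range (g.getD 0 []).length).countP (fun c =>
    decide ((g.getD a []).getD c ' ' ≠ (g.getD b []).getD c ' '))

def pvHM (g : List (List Char)) (i : Nat) : Nat :=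
  ((List.range (min (i + 1) (g.length - 1 - i))).map (fun d => pvMiss g (i - d) (i + 1 + d))).sum

def pvVM (g : List (List Char)) (j : Nat) : Nat :=
  ((List.range g.length).map (fun r =>
    (List.range (min (j + 1) ((g.getD 0 []).length - 1 - j))).countP (fun d =>
      decide ((g.getD r []).getD (j - d) ' ' ≠ (g.getD r []).getD (j + 1 + d) ' ')))).sum

def pvH (g : List (List Char)) : List Nat :=
  (List.range (g.length - 1)).filter (fun i => decide (pvHM g i = 1))

def pvV (g : List (List Char)) : List Nat :=
  (List.range ((g.getD 0 []).length - 1)).filter (fun j => decide (pvVM g j = 1))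

def pvOk (g : List (List Char)) : Prop :=
  g ≠ [] ∧ g.getD 0 [] ≠ [] ∧ (∀ r ∈ g, r.length = (g.getD 0 []).length) ∧
    (pvH g).length + (pvV g).length = 1

-- Pre_ excludes inputs where A raises (a pattern with no lines, an empty first line, a line
-- shorter than the first, or not exactly one 1-smudge fold line, where A's assert fails), and
-- ragged patterns with lines longer than the first, where A silently ignores the columns beyond
-- len(line0) — an artefact of indexing by line0 — while B's zip-truncation/assert may differ or raise.
def Pre_solve (input : String) : Prop :=
  ∀ bl ∈ PySem.Chars.splitOn input.toList ['\n', '\n'], pvOk (PySem.Chars.splitlines bl)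
instance (input : String) : Decidable (Pre_solve input) := by unfold Pre_solve; unfold pvOk; infer_instance

def pvWitness_solve : String := "###\n..#"

def Spec_solve (input : String) (out : Int) : Prop := out = solve_alt input
instance (input : String) (out : Int) : Decidable (Spec_solve input out) := by unfold Spec_solve; infer_instance

-- ===== CLAIM (what is proved, stated in full; the proofs are below) =====
def Claim_equal_solve : Prop := ∀ (input : String), Dom_solve input → Pre_solve input → Spec_solve input (solve input)


-- ===== LEMMAS AND PROOFS =====

-- sum of casts is cast of sum
theorem pv_sum_map_natCast {alpha : Type} (l : List alpha) (f : alpha → Nat) :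
    (l.map (fun x => ((f x : Nat) : Int))).sum = (((l.map f).sum : Nat) : Int) := by
  induction l with
  | nil => simp
  | cons x xs ih => simp [ih]

-- indexing a list by its own range is the list
theorem pv_map_range_getD {alpha beta : Type} (g : List alpha) (d : alpha) (h : alpha → beta) :
    (List.range g.length).map (fun r => h (g.getD r d)) = g.map h := by
  apply List.ext_getElem
  · simp
  · intro i h1 h2
    simp at h1 ⊢
    simp [List.getElem?_eq_getElem (by simpa using h1)]

-- zip-wise hamming count equals index-wise mismatch count on equal-length rows
theorem pv_countP_zip (r s : List Char) (h : r.length = s.length) :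
    (List.zip r s).countP (fun ab => decide (ab.1 ≠ ab.2))
    = (List.range r.length).countP (fun c => decide (r.getD c ' ' ≠ s.getD c ' ')) := by
  induction r generalizing s with
  | nil => simp
  | cons a r' ih =>
    cases s with
    | nil => simp at h
    | cons b s' =>
      simp only [List.zip_cons_cons, List.countP_cons, List.length_cons,
        List.range_succ_eq_map, List.countP_map]
      rw [ih s' (by simpa using h)]
      simp only [List.countP_map, Function.comp_def, Nat.succ_eq_add_one,
        List.getD_cons_succ, List.getD_cons_zero]

-- A's zipped pair iterator is the mirrored-depth iterator
theorem pv_zip_ranges (i n : Nat) (h : i < n) :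
    List.zip ((PySem.List.pyRange 0 ((i:Int) + 1) 1).reverse) (PySem.List.pyRange ((i:Int) + 1) (n:Int) 1)
    = (List.range (min (i + 1) (n - 1 - i))).map
        (fun (d : Nat) => (((i:Int) - (d:Int)), ((i:Int) + 1 + (d:Int)))) := by
  apply List.ext_getElem
  · simp [PySem.List.length_pyRange_one]; omega
  · intro k h1 h2
    have hk : k < min (i + 1) (n - 1 - i) := by simpa using h2
    simp only [List.getElem_zip, List.getElem_map, List.getElem_range, List.getElem_reverse]
    rw [PySem.List.getElem_pyRange_one, PySem.List.getElem_pyRange_one]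
    refine Prod.ext ?_ ?_ <;> simp [PySem.List.length_pyRange_one] <;> omega

-- exchanging the two summations of a mismatch double count
theorem pv_swap (K n : Nat) (P : Nat → Nat → Bool) :
    ((List.range K).map (fun d => (List.range n).countP (fun c => P d c))).sum
    = ((List.range n).map (fun c => (List.range K).countP (fun d => P d c))).sum := by
  have cp : ∀ (k : Nat) (p : Nat → Bool),
      (List.range k).countP p = ∑ x ∈ Finset.range k, if p x then 1 else 0 := by
    intro k p
    induction k with
    | zero => simp
    | succ k ih =>
      rw [List.range_succ, Finset.sum_range_succ, List.countP_append, ih]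
      simp [List.countP_cons]
  have sr : ∀ (k : Nat) (f : Nat → Nat), ((List.range k).map f).sum = ∑ x ∈ Finset.range k, f x := by
    intro k f
    induction k with
    | zero => simp
    | succ k ih =>
      rw [List.range_succ, Finset.sum_range_succ, List.map_append, List.sum_append, ih]
      simp
  rw [sr, sr]
  simp only [cp]
  exact Finset.sum_comm

-- ---- A side ----

theorem missesRowA_eq (g : List (List Char)) (t b : Nat) :
    missesRowA g ((g.getD 0 []).length : Int) (t : Int) (b : Int) = (pvMiss g t b : Int) := by
  unfold missesRowA pvMiss
  rw [PySem.List.foldl_ite_add_one]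
  rw [PySem.List.pyRange_zero_natCast]
  simp [List.countP_map, Function.comp_def, PySem.List.pyGetD_natCast]

theorem hmissA_eq (g : List (List Char)) (i : Nat) (hi : i < g.length - 1) :
    (List.zip ((PySem.List.pyRange 0 ((i:Int) + 1) 1).reverse)
        (PySem.List.pyRange ((i:Int) + 1) (g.length : Int) 1)).foldl
      (fun s tb => s + missesRowA g ((g.getD 0 []).length : Int) tb.1 tb.2) 0
    = (pvHM g i : Int) := by
  rw [pv_zip_ranges i g.length (by omega), List.foldl_map, PySem.List.foldl_add]
  unfold pvHM
  have hcong : ∀ d ∈ List.range (min (i + 1) (g.length - 1 - i)),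
      missesRowA g ((g.getD 0 []).length : Int) ((i:Int) - (d:Int)) ((i:Int) + 1 + (d:Int))
      = ((pvMiss g (i - d) (i + 1 + d) : Nat) : Int) := by
    intro d hd
    simp only [List.mem_range] at hd
    have h1 : (i:Int) - (d:Int) = ((i - d : Nat) : Int) := by omega
    have h2 : (i:Int) + 1 + (d:Int) = ((i + 1 + d : Nat) : Int) := by omega
    simp only [h1, h2, missesRowA_eq]
  show 0 + (List.map (fun (d : Nat) => missesRowA g ((g.getD 0 []).length : Int)
      ((i:Int) - (d:Int)) ((i:Int) + 1 + (d:Int))) (List.range (min (i + 1) (g.length - 1 - i)))).sum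
    = ((pvHM g i : Nat) : Int)
  rw [List.map_congr_left hcong, pv_sum_map_natCast, zero_add]
  rfl

theorem getAlmostH_eq (g : List (List Char)) (hne : g ≠ []) :
    getAlmostHorizontalSymetries g = (pvH g).map (fun (i : Nat) => ((i:Int), (i:Int) + 1)) := by
  unfold getAlmostHorizontalSymetries
  simp only [PySem.List.len_eq, PySem.List.pyGetD_zero]
  have hn : (g.length : Int) - 1 = ((g.length - 1 : Nat) : Int) := by
    have : g.length ≠ 0 := by simpa using congrArg List.length |>.mt (by simpa [List.length_eq_zero_iff] using hne)
    omega
  rw [hn, PySem.List.pyRange_zero_natCast,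
    PySem.List.foldl_append_ite
      (p := fun (i : Int) =>
        (List.zip ((PySem.List.pyRange 0 (i + 1) 1).reverse)
            (PySem.List.pyRange (i + 1) (g.length : Int) 1)).foldl
          (fun s tb => s + missesRowA g ((g.getD 0 []).length : Int) tb.1 tb.2) 0 = 1)
      (f := fun (i : Int) => (i, i + 1))]
  rw [List.filter_map, List.map_map]
  unfold pvH
  rw [List.filter_congr (q := fun i => decide (pvHM g i = 1)) ?_]
  · simp [Function.comp_def]
  · intro i hi
    simp only [List.mem_range] at hi
    simp only [Function.comp_def, hmissA_eq g i hi]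
    simp

-- ---- transpose ----

theorem transposeA_eq (g : List (List Char)) :
    transposeA g = (List.range (g.getD 0 []).length).map (fun j =>
      (List.range g.length).map (fun i => (g.getD i []).getD j ' ')) := by
  unfold transposeA
  simp only [PySem.List.len_eq, PySem.List.pyGetD_zero, PySem.List.pyRange_zero_natCast,
    List.map_map]
  apply List.map_congr_left
  intro j _
  apply List.map_congr_left
  intro i _
  simp [PySem.List.pyGetD_natCast]

theorem pvHM_transpose (g : List (List Char)) (hm : g.getD 0 [] ≠ []) (j : Nat) :
    pvHM ((List.range (g.getD 0 []).length).map (fun j =>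
      (List.range g.length).map (fun i => (g.getD i []).getD j ' '))) j = pvVM g j := by
  have hm0 : 0 < (g.getD 0 []).length := List.length_pos_iff.mpr hm
  have colGet : ∀ (a c : Nat), a < (g.getD 0 []).length → c < g.length →
      (((List.range (g.getD 0 []).length).map (fun j =>
        (List.range g.length).map (fun i => (g.getD i []).getD j ' '))).getD a []).getD c ' '
      = (g.getD c []).getD a ' ' := by
    intro a c ha hc
    rw [PySem.List.getD_map_range _ _ _ _ ha, PySem.List.getD_map_range _ _ _ _ hc]
  unfold pvHM pvVM pvMiss
  simp only [List.length_map, List.length_range]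
  rw [PySem.List.getD_map_range _ _ _ _ hm0]
  simp only [List.length_map, List.length_range]
  have hbody : ∀ d ∈ List.range (min (j + 1) ((g.getD 0 []).length - 1 - j)),
      (List.range g.length).countP (fun c =>
        decide ((((List.range (g.getD 0 []).length).map (fun j =>
          (List.range g.length).map (fun i => (g.getD i []).getD j ' '))).getD (j - d) []).getD c ' '
          ≠ (((List.range (g.getD 0 []).length).map (fun j =>
          (List.range g.length).map (fun i => (g.getD i []).getD j ' '))).getD (j + 1 + d) []).getD c ' '))
      = (List.range g.length).countP (fun c =>
        decide ((g.getD c []).getD (j - d) ' ' ≠ (g.getD c []).getD (j + 1 + d) ' ')) := by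
    intro d hd
    simp only [List.mem_range] at hd
    have hd1 : j - d < (g.getD 0 []).length := by omega
    have hd2 : j + 1 + d < (g.getD 0 []).length := by omega
    apply List.countP_congr
    intro c hc
    simp only [List.mem_range] at hc
    rw [colGet _ _ hd1 hc, colGet _ _ hd2 hc]
  rw [List.map_congr_left hbody]
  exact pv_swap _ _ (fun d c => decide ((g.getD c []).getD (j - d) ' ' ≠ (g.getD c []).getD (j + 1 + d) ' '))

theorem pvH_transpose (g : List (List Char)) (hm : g.getD 0 [] ≠ []) :
    pvH ((List.range (g.getD 0 []).length).map (fun j =>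
      (List.range g.length).map (fun i => (g.getD i []).getD j ' '))) = pvV g := by
  unfold pvH pvV
  simp only [List.length_map, List.length_range]
  apply List.filter_congr
  intro j _
  rw [pvHM_transpose g hm j]

-- ---- B side ----

-- structural companion of scanPairs: fold the early-exit loop over an explicit pair list
def pvScanList (rows : List (List Char)) : List (Int × Int) → Option (Int × Int) → Option (Option (Int × Int))
  | [], bad => some bad
  | p :: rest, bad =>
      if PySem.List.pyGetD rows p.1 [] ≠ PySem.List.pyGetD rows p.2 [] then
        match bad with
        | some _ => none
        | none => pvScanList rows rest (some p)
      else pvScanList rows rest bad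

-- the pair sequence scanPairs walks
def pvPairsFrom (rows : List (List Char)) (t b : Int) : List (Int × Int) :=
  if h : 0 ≤ t ∧ b < PySem.List.len rows then (t, b) :: pvPairsFrom rows (t - 1) (b + 1)
  else []
termination_by (PySem.List.len rows - b).toNat
decreasing_by simp only [PySem.List.len_eq] at h ⊢; omega

theorem scanPairs_eq (rows : List (List Char)) (t b : Int) (bad : Option (Int × Int)) :
    scanPairs rows t b bad = pvScanList rows (pvPairsFrom rows t b) bad := by
  fun_induction scanPairs rows t b bad with
  | _ => first
    | (rename_i h; rw [pvPairsFrom, dif_neg h]; rfl)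
    | (rename_i h hne ih; rw [pvPairsFrom, dif_pos h]; simp only [pvScanList, if_pos hne]; exact ih)
    | (rename_i h hne ih; rw [pvPairsFrom, dif_pos h]; simp only [pvScanList, if_neg hne]; exact ih)
    | (rename_i h hne val; rw [pvPairsFrom, dif_pos h]; simp [pvScanList, hne])

theorem pvPairsFrom_eq (rows : List (List Char)) (t b : Int) :
    pvPairsFrom rows t b
    = (List.range ((min (t + 1) ((rows.length : Int) - b)).toNat)).map
        (fun (d : Nat) => (t - (d : Int), b + (d : Int))) := by
  fun_induction pvPairsFrom rows t b with
  | case1 t b h ih =>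
    simp only [PySem.List.len_eq] at h
    have hK : (min (t + 1) ((rows.length : Int) - b)).toNat
        = (min ((t - 1) + 1) ((rows.length : Int) - (b + 1))).toNat + 1 := by omega
    rw [ih, hK, List.range_succ_eq_map, List.map_cons, List.map_map]
    refine congrArg₂ _ (by simp) ?_
    apply List.map_congr_left
    intro d _
    simp only [Function.comp_def]
    refine congrArg₂ _ ?_ ?_ <;> push_cast <;> ring
  | case2 t b h =>
    simp only [PySem.List.len_eq] at h
    have : (min (t + 1) ((rows.length : Int) - b)).toNat = 0 := by omega
    simp [this]

-- early-exit scan after a pair has been recorded: succeeds iff no further unequal pair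
theorem pvScanList_some (rows : List (List Char)) (L : List (Int × Int)) (p : Int × Int) :
    pvScanList rows L (some p)
    = if L.filter (fun q => decide (PySem.List.pyGetD rows q.1 [] ≠ PySem.List.pyGetD rows q.2 [])) = []
      then some (some p) else none := by
  induction L with
  | nil => simp [pvScanList]
  | cons q L ih =>
    by_cases hq : PySem.List.pyGetD rows q.1 [] ≠ PySem.List.pyGetD rows q.2 []
    · rw [List.filter_cons_of_pos (by simpa using hq)]
      simp [pvScanList, hq]
    · rw [List.filter_cons_of_neg (by simpa using hq)]
      simp only [pvScanList, if_neg hq]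
      exact ih

-- full characterisation of the scan by the list of unequal mirrored pairs
theorem pvScanList_none (rows : List (List Char)) (L : List (Int × Int)) :
    pvScanList rows L none
    = match L.filter (fun q => decide (PySem.List.pyGetD rows q.1 [] ≠ PySem.List.pyGetD rows q.2 [])) with
      | [] => some none
      | [p] => some (some p)
      | _ => none := by
  induction L with
  | nil => simp [pvScanList]
  | cons q L ih =>
    by_cases hq : PySem.List.pyGetD rows q.1 [] ≠ PySem.List.pyGetD rows q.2 []
    · rw [List.filter_cons_of_pos (by simpa using hq)]
      simp only [pvScanList, if_pos hq]
      rw [pvScanList_some]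
      by_cases hL : L.filter (fun q => decide (PySem.List.pyGetD rows q.1 [] ≠ PySem.List.pyGetD rows q.2 [])) = []
      · rw [if_pos hL, hL]
      · rw [if_neg hL]
        obtain ⟨x, xs, hxs⟩ := List.exists_cons_of_ne_nil hL
        rw [hxs]
    · rw [List.filter_cons_of_neg (by simpa using hq)]
      simp only [pvScanList, if_neg hq]
      exact ih

-- a sum of naturals is 1 iff exactly one summand is nonzero and that summand is 1
theorem pv_sum_one_iff {alpha : Type} (l : List alpha) (f : alpha → Nat) :
    (l.map f).sum = 1 ↔ ∃ d, l.filter (fun x => decide (f x ≠ 0)) = [d] ∧ f d = 1 := by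
  induction l with
  | nil => simp
  | cons x l ih =>
    by_cases hx : f x = 0
    · rw [List.map_cons, List.sum_cons, hx, Nat.zero_add,
        List.filter_cons_of_neg (by simp [hx])]
      exact ih
    · rw [List.map_cons, List.sum_cons, List.filter_cons_of_pos (by simp [hx])]
      constructor
      · intro h
        have hfx : f x = 1 := by omega
        have hsum : (l.map f).sum = 0 := by omega
        have hfil : l.filter (fun x => decide (f x ≠ 0)) = [] := by
          rw [List.filter_eq_nil_iff]
          intro a ha
          have := List.sum_eq_zero_iff.mp hsum (f a) (List.mem_map_of_mem ha)
          simpa using this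
        exact ⟨x, by rw [hfil], hfx⟩
      · rintro ⟨d, hd, hfd⟩
        obtain ⟨hxd, hfil⟩ := List.cons_eq_cons.mp hd
        have hsum : (l.map f).sum = 0 := by
          rw [List.sum_eq_zero_iff]
          intro n hn
          obtain ⟨a, ha, rfl⟩ := List.mem_map.mp hn
          by_contra hne
          have : a ∈ l.filter (fun x => decide (f x ≠ 0)) := by
            rw [List.mem_filter]; exact ⟨ha, by simpa using hne⟩
          rw [hfil] at this
          simp at this
        rw [hxd, hfd, hsum]

-- rows of a rectangular grid are equal iff their mismatch count vanishes
theorem pvMiss_zero_iff (g : List (List Char)) (hrect : ∀ r ∈ g, r.length = (g.getD 0 []).length)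
    (a b : Nat) (ha : a < g.length) (hb : b < g.length) :
    pvMiss g a b = 0 ↔ g.getD a [] = g.getD b [] := by
  have hla : (g.getD a []).length = (g.getD 0 []).length := by
    rw [List.getD_eq_getElem g [] ha]; exact hrect _ (List.getElem_mem ha)
  have hlb : (g.getD b []).length = (g.getD 0 []).length := by
    rw [List.getD_eq_getElem g [] hb]; exact hrect _ (List.getElem_mem hb)
  unfold pvMiss
  rw [List.countP_eq_zero]
  constructor
  · intro h0
    apply List.ext_getElem (hla.trans hlb.symm)
    intro c h1 h2
    have := h0 c (List.mem_range.mpr (by omega))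
    rw [List.getD_eq_getElem _ ' ' h1, List.getD_eq_getElem _ ' ' h2] at this
    simpa using this
  · intro heq c _
    simp only [heq]
    simp

-- hammingIsOne on rows of equal length is the pvMiss-count-1 test
theorem hammingIsOne_eq (g : List (List Char)) (hrect : ∀ r ∈ g, r.length = (g.getD 0 []).length)
    (a b : Nat) (ha : a < g.length) (hb : b < g.length) :
    hammingIsOne (g.getD a []) (g.getD b []) = decide (pvMiss g a b = 1) := by
  have hla : (g.getD a []).length = (g.getD 0 []).length := by
    rw [List.getD_eq_getElem g [] ha]; exact hrect _ (List.getElem_mem ha)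
  have hlb : (g.getD b []).length = (g.getD 0 []).length := by
    rw [List.getD_eq_getElem g [] hb]; exact hrect _ (List.getElem_mem hb)
  unfold hammingIsOne
  rw [PySem.List.foldl_ite_add_one, pv_countP_zip _ _ (hla.trans hlb.symm)]
  unfold pvMiss
  rw [hla]
  apply decide_eq_decide.mpr
  omega

-- the crucial B-side lemma: the early-exit mirror check decides pvHM = 1
theorem mirrorOk_eq (g : List (List Char)) (hrect : ∀ r ∈ g, r.length = (g.getD 0 []).length)
    (i : Nat) (hi : i < g.length - 1) :
    mirrorOk g (i : Int) = decide (pvHM g i = 1) := by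
  have hK : ((min ((i : Int) + 1) ((g.length : Int) - ((i : Int) + 1))).toNat)
      = min (i + 1) (g.length - 1 - i) := by omega
  unfold mirrorOk
  rw [scanPairs_eq, pvPairsFrom_eq, hK, pvScanList_none, List.filter_map]
  have hfil : (List.range (min (i + 1) (g.length - 1 - i))).filter
        ((fun q => decide (PySem.List.pyGetD g q.1 [] ≠ PySem.List.pyGetD g q.2 []))
          ∘ (fun (d : Nat) => ((i : Int) - (d : Int), (i : Int) + 1 + (d : Int))))
      = (List.range (min (i + 1) (g.length - 1 - i))).filter
        (fun d => decide (pvMiss g (i - d) (i + 1 + d) ≠ 0)) := by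
    apply List.filter_congr
    intro d hd
    simp only [List.mem_range] at hd
    have h1 : (i : Int) - (d : Int) = ((i - d : Nat) : Int) := by omega
    have h2 : (i : Int) + 1 + (d : Int) = ((i + 1 + d : Nat) : Int) := by omega
    simp only [Function.comp_def, h1, h2, PySem.List.pyGetD_natCast]
    apply decide_eq_decide.mpr
    exact not_congr (pvMiss_zero_iff g hrect (i - d) (i + 1 + d) (by omega) (by omega)).symm
  rw [hfil]
  have hsum := pv_sum_one_iff (List.range (min (i + 1) (g.length - 1 - i)))
      (fun d => pvMiss g (i - d) (i + 1 + d))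
  rcases hD : (List.range (min (i + 1) (g.length - 1 - i))).filter
      (fun d => decide (pvMiss g (i - d) (i + 1 + d) ≠ 0)) with _ | ⟨d, _ | ⟨d2, rest⟩⟩
  · rw [List.map_nil]
    have : ¬ pvHM g i = 1 := by
      unfold pvHM
      rw [hsum]
      rintro ⟨d, hd, -⟩
      rw [hD] at hd
      exact List.cons_ne_nil d [] hd.symm
    simp [this]
  · rw [List.map_cons, List.map_nil]
    have hdK : d < min (i + 1) (g.length - 1 - i) := by
      have : d ∈ (List.range (min (i + 1) (g.length - 1 - i))).filter
          (fun d => decide (pvMiss g (i - d) (i + 1 + d) ≠ 0)) := by rw [hD]; simp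
      simpa using (List.mem_filter.mp this).1
    have h1 : (i : Int) - (d : Int) = ((i - d : Nat) : Int) := by omega
    have h2 : (i : Int) + 1 + (d : Int) = ((i + 1 + d : Nat) : Int) := by omega
    show hammingIsOne (PySem.List.pyGetD g ((i : Int) - (d : Int)) [])
        (PySem.List.pyGetD g ((i : Int) + 1 + (d : Int)) []) = decide (pvHM g i = 1)
    rw [h1, h2, PySem.List.pyGetD_natCast, PySem.List.pyGetD_natCast,
      hammingIsOne_eq g hrect _ _ (by omega) (by omega)]
    apply decide_eq_decide.mpr
    unfold pvHM
    rw [hsum]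
    constructor
    · intro hm
      exact ⟨d, hD, hm⟩
    · rintro ⟨d', hd', hm⟩
      rw [hD] at hd'
      obtain ⟨rfl, -⟩ := List.cons_eq_cons.mp hd'
      exact hm
  · rw [List.map_cons, List.map_cons]
    have : ¬ pvHM g i = 1 := by
      unfold pvHM
      rw [hsum]
      rintro ⟨d', hd', -⟩
      rw [hD] at hd'
      have := congrArg List.length hd'
      simp at this
    simp [this]

theorem foldScores_eq (g : List (List Char)) (hne : g ≠ [])
    (hrect : ∀ r ∈ g, r.length = (g.getD 0 []).length) (w : Int) :
    foldScores g w = (pvH g).map (fun (i : Nat) => w * ((i : Int) + 1)) := by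
  unfold foldScores
  simp only [PySem.List.len_eq]
  have hn : (g.length : Int) - 1 = ((g.length - 1 : Nat) : Int) := by
    have : g.length ≠ 0 := by simpa [List.length_eq_zero_iff] using hne
    omega
  rw [hn, PySem.List.pyRange_zero_natCast, List.filter_map, List.map_map]
  unfold pvH
  rw [List.filter_congr (q := fun i => decide (pvHM g i = 1)) ?_]
  · simp [Function.comp_def]
  · intro i hi
    simp only [List.mem_range] at hi
    simp only [Function.comp_def, mirrorOk_eq g hrect i hi]

theorem zipCols_eq (g : List (List Char)) (hne : g ≠ [])
    (hrect : ∀ r ∈ g, r.length = (g.getD 0 []).length) :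
    zipCols g = (List.range (g.getD 0 []).length).map (fun j =>
      (List.range g.length).map (fun i => (g.getD i []).getD j ' ')) := by
  have hmem : g.getD 0 [] ∈ g := by
    cases g with
    | nil => exact absurd rfl hne
    | cons x xs => simp
  have hmin : ((g.map List.length).min?).getD 0 = (g.getD 0 []).length := by
    have : (g.map List.length).min? = some (g.getD 0 []).length := by
      rw [List.min?_eq_some_iff']
      constructor
      · exact List.mem_map_of_mem hmem
      · intro b hb
        obtain ⟨r, hr, rfl⟩ := List.mem_map.mp hb
        rw [hrect r hr]
    rw [this]; rfl
  unfold zipCols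
  rw [hmin]
  apply List.map_congr_left
  intro j _
  rw [← pv_map_range_getD g [] (fun r => r.getD j ' ')]

-- ---- per-pattern step ----
-- ---- per-pattern step ----

theorem block_eq (g : List (List Char)) (h : pvOk g) (ans : Int) :
    (getAlmostHorizontalSymetries g).foldl (fun a tb => a + 100 * (tb.1 + 1))
      ((getAlmostHorizontalSymetries (transposeA g)).foldl (fun a lr => a + (lr.1 + 1)) ans)
    = ans + PySem.List.pyGetD (foldScores g 100 ++ foldScores (zipCols g) 1) 0 0 := by
  obtain ⟨hne, hm, hrect, hone⟩ := h
  have hm0 : 0 < (g.getD 0 []).length := List.length_pos_iff.mpr hm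
  have hTne : (List.range (g.getD 0 []).length).map (fun j =>
      (List.range g.length).map (fun i => (g.getD i []).getD j ' ')) ≠ [] := by
    apply List.ne_nil_of_length_pos
    simpa using hm0
  have hTrect : ∀ r ∈ (List.range (g.getD 0 []).length).map (fun j =>
      (List.range g.length).map (fun i => (g.getD i []).getD j ' ')),
      r.length = (((List.range (g.getD 0 []).length).map (fun j =>
        (List.range g.length).map (fun i => (g.getD i []).getD j ' '))).getD 0 []).length := by
    intro r hr
    obtain ⟨j, hj, rfl⟩ := List.mem_map.mp hr
    rw [PySem.List.getD_map_range _ _ _ _ hm0]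
    simp
  rw [transposeA_eq, getAlmostH_eq _ hTne, pvH_transpose g hm, getAlmostH_eq g hne,
    zipCols_eq g hne hrect, foldScores_eq g hne hrect 100,
    foldScores_eq _ hTne hTrect 1, pvH_transpose g hm]
  rw [PySem.List.foldl_add, PySem.List.foldl_add]
  have hcase : ((pvH g).length = 1 ∧ (pvV g).length = 0) ∨
      ((pvH g).length = 0 ∧ (pvV g).length = 1) := by omega
  rcases hcase with ⟨h1, h2⟩ | ⟨h1, h2⟩
  · obtain ⟨a, ha⟩ := List.length_eq_one_iff.mp h1
    have hv : pvV g = [] := List.length_eq_zero_iff.mp h2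
    rw [ha, hv]
    simp [PySem.List.pyGetD_zero_cons]
  · obtain ⟨a, ha⟩ := List.length_eq_one_iff.mp h2
    have hh : pvH g = [] := List.length_eq_zero_iff.mp h1
    rw [ha, hh]
    simp [PySem.List.pyGetD_zero_cons]

-- ===== VERDICT (by name: the statement is the Claim_ definition above) =====
theorem solve_spec : Claim_equal_solve := by
  intro input _ hpre
  unfold Spec_solve solve solve_alt parseA
  rw [List.foldl_map]
  exact PySem.List.foldl_congr_mem _ _ _ _
    (fun acc bl hbl => block_eq (PySem.Chars.splitlines bl) (hpre bl hbl) acc)
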